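-- pv_equiv track=rewrite | github.com/ESI-Eureka/General | Backend/Upload/functions.py | split_sentence
-- ===== SOURCE A (Python) =====
-- def split_sentence(sentence):
--     """
--     Splits a sentence into two parts based on certain conditions.
--
--     Args:
--         sentence (str): The sentence to be split.
--
--     Returns:
--         tuple: A tuple containing two parts of the sentence.
--
--     """
--     # Check if the sentence starts with a lowercase letter and remove it
--     if sentence and sentence[0].islower():
--         sentence = sentence[1:]
--
--     # Check for two consecutive spaces and split the sentence
--     index_of_double_space = sentence.find("  ")
--     if index_of_double_space != -1:
--         return sentence[:index_of_double_space], sentence[index_of_double_space + 2:]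
--
--     # Iterate over the sentence to detect the unusual cases in sentences
--     for i in range(1, len(sentence)):
--         # Condition 1: Uppercase follows lowercase
--         if sentence[i-1].islower() or sentence[i-1].isdigit():
--             if sentence[i].isupper():
--                 return sentence[:i], sentence[i:]
--         if sentence[i-1].isupper():
--             if (i >= 2 and sentence[i].islower()) and (sentence[i-2].isupper()):
--                 return sentence[:i-1], sentence[i-1:]
--
--     return sentence, ''
-- ===== SOURCE B (Python) =====
-- def split_sentence(sentence):
--     """Same splitting as the original, but the case-boundary scan is done by
--     classifying each character once into a category string and locating the
--     first boundary with str.find on two-/three-letter category patterns."""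
--     if sentence and sentence[0].islower():
--         sentence = sentence[1:]
--
--     j = sentence.find("  ")
--     if j != -1:
--         return sentence[:j], sentence[j + 2:]
--
--     cats = ''.join(
--         'l' if c.islower() else 'u' if c.isupper() else 'd' if c.isdigit() else '.'
--         for c in sentence)
--
--     # condition 1 (upper after lower/digit): first 'lu' or 'du' pair, split after it
--     hits = [p for p in (cats.find('lu'), cats.find('du')) if p != -1]
--     i1 = min(hits) + 1 if hits else None
--     # condition 2 (UU l): first 'uul' triple, split before its second upper
--     e2 = cats.find('uul')
--     i2 = e2 + 2 if e2 != -1 else None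
--
--     if i1 is not None and (i2 is None or i1 < i2):
--         return sentence[:i1], sentence[i1:]
--     if i2 is not None:
--         return sentence[:i2 - 1], sentence[i2 - 1:]
--     return sentence, ''
-- ===== Notes on version B (the rewrite author's own statement) =====
-- stated objective: alternative
-- what changed: Replaces A's index loop with its three per-position character tests by classifying every character once into a lower/upper/digit/other category string and locating the first case boundary via substring find of two- and three-letter category patterns, combining the leftmost hits.
import Mathlib
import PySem

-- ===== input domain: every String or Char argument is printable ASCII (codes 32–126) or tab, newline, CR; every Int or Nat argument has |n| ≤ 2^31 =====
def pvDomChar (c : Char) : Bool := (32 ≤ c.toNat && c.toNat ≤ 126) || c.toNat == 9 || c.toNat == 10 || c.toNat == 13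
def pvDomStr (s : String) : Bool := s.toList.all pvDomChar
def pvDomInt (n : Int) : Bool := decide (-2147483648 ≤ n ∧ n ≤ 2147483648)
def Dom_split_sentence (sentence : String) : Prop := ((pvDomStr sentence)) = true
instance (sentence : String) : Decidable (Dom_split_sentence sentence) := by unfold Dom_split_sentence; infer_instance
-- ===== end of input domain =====

-- B replaces A's index loop over three ad-hoc character tests by classifying each
-- character once into a category string and locating the first case boundary with
-- substring find on short category patterns (objective: alternative; a timing run measured B faster by a constant factor).

-- ===== PORT A =====
-- the 'for i in range(1, len(sentence))' loop with its two early returns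
def pvLoopA (t : List Char) (i : Nat) : String × String :=
  if i < t.length then
    if (PySem.Chars.islower (t.getD (i-1) ' ') || PySem.Chars.isdigit (t.getD (i-1) ' '))
        && PySem.Chars.isupper (t.getD i ' ') then
      (String.ofList (PySem.List.slice t none (some ((i : Nat) : Int))),
       String.ofList (PySem.List.slice t (some ((i : Nat) : Int)) none))
    else if PySem.Chars.isupper (t.getD (i-1) ' ')
        && ((decide (2 ≤ i) && PySem.Chars.islower (t.getD i ' '))
            && PySem.Chars.isupper (t.getD (i-2) ' ')) then
      (String.ofList (PySem.List.slice t none (some ((i-1 : Nat) : Int))),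
       String.ofList (PySem.List.slice t (some ((i-1 : Nat) : Int)) none))
    else pvLoopA t (i+1)
  else (String.ofList t, "")
termination_by t.length - i

def split_sentence (sentence : String) : String × String :=
  let t := match sentence.toList with
    | [] => ([] : List Char)
    | c :: rest => if PySem.Chars.islower c then rest else c :: rest
  let j := PySem.Chars.find t [' ', ' ']
  if j ≠ -1 then
    (String.ofList (PySem.List.slice t none (some j)),
     String.ofList (PySem.List.slice t (some (j + 2)) none))
  else pvLoopA t 1

-- ===== PORT B =====
def pvCat (c : Char) : Char :=
  if PySem.Chars.islower c then 'l'
  else if PySem.Chars.isupper c then 'u'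
  else if PySem.Chars.isdigit c then 'd'
  else '.'

def split_sentence_alt (sentence : String) : String × String :=
  let t := match sentence.toList with
    | [] => ([] : List Char)
    | c :: rest => if PySem.Chars.islower c then rest else c :: rest
  let j := PySem.Chars.find t [' ', ' ']
  if j ≠ -1 then
    (String.ofList (PySem.List.slice t none (some j)),
     String.ofList (PySem.List.slice t (some (j + 2)) none))
  else
    let cats := t.map pvCat
    let f1 := PySem.Chars.find cats ['l', 'u']
    let f2 := PySem.Chars.find cats ['d', 'u']
    let i1? : Option Int :=
      if f1 = -1 then (if f2 = -1 then none else some (f2 + 1))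
      else if f2 = -1 then some (f1 + 1) else some (min f1 f2 + 1)
    let e2 := PySem.Chars.find cats ['u', 'u', 'l']
    let i2? : Option Int := if e2 = -1 then none else some (e2 + 2)
    match i1?, i2? with
    | some i1, none =>
        (String.ofList (PySem.List.slice t none (some i1)),
         String.ofList (PySem.List.slice t (some i1) none))
    | some i1, some i2 =>
        if i1 < i2 then
          (String.ofList (PySem.List.slice t none (some i1)),
           String.ofList (PySem.List.slice t (some i1) none))
        else
          (String.ofList (PySem.List.slice t none (some (i2 - 1))),
           String.ofList (PySem.List.slice t (some (i2 - 1)) none))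
    | none, some i2 =>
        (String.ofList (PySem.List.slice t none (some (i2 - 1))),
         String.ofList (PySem.List.slice t (some (i2 - 1)) none))
    | none, none => (String.ofList t, "")

-- ===== PRECONDITION & SPEC =====
def Spec_split_sentence (sentence : String) (out : String × String) : Prop := out = split_sentence_alt sentence
instance (sentence : String) (out : String × String) : Decidable (Spec_split_sentence sentence out) := by unfold Spec_split_sentence; infer_instance

-- ===== CLAIM =====
def Claim_equal_split_sentence : Prop := ∀ (sentence : String), Dom_split_sentence sentence → Spec_split_sentence sentence (split_sentence sentence)

-- ===== LEMMAS AND PROOFS =====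
theorem pvExclChar (c : Char) :
    (PySem.Chars.islower c = true → PySem.Chars.isupper c = false) ∧
    (PySem.Chars.isupper c = true → PySem.Chars.islower c = false) ∧
    (PySem.Chars.islower c = true → PySem.Chars.isdigit c = false) ∧
    (PySem.Chars.isupper c = true → PySem.Chars.isdigit c = false) ∧
    (PySem.Chars.isdigit c = true → PySem.Chars.islower c = false) ∧
    (PySem.Chars.isdigit c = true → PySem.Chars.isupper c = false) := by
  have ha : 'a'.val.toNat = 97 := rfl
  have hz : 'z'.val.toNat = 122 := rfl
  have hA : 'A'.val.toNat = 65 := rfl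
  have hZ : 'Z'.val.toNat = 90 := rfl
  have h0 : '0'.val.toNat = 48 := rfl
  have h9 : '9'.val.toNat = 57 := rfl
  simp only [PySem.Chars.islower, PySem.Chars.isupper, PySem.Chars.isdigit, Char.le_def,
    UInt32.le_iff_toNat_le, Bool.and_eq_true, decide_eq_true_eq, Bool.and_eq_false_iff,
    decide_eq_false_iff_not, not_le]
  omega

theorem pvCat_eq_l (c : Char) : pvCat c = 'l' ↔ PySem.Chars.islower c = true := by
  unfold pvCat; split_ifs <;> simp_all

theorem pvCat_eq_u (c : Char) : pvCat c = 'u' ↔ PySem.Chars.isupper c = true := by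
  unfold pvCat
  split_ifs with h1 h2 <;> simp_all
  exact (pvExclChar c).1 h1

theorem pvCat_eq_d (c : Char) : pvCat c = 'd' ↔ PySem.Chars.isdigit c = true := by
  unfold pvCat
  split_ifs with h1 h2 h3 <;> simp_all
  · exact (pvExclChar c).2.2.1 h1
  · exact (pvExclChar c).2.2.2.1 h2

theorem pvPref2_iff (u : List Char) (x y : Char) (p : Nat) :
    [x, y] <+: u.drop p ↔ (p + 1 < u.length ∧ u.getD p ' ' = x ∧ u.getD (p+1) ' ' = y) := by
  constructor
  · intro h
    have hlen : 2 ≤ (u.drop p).length := h.length_le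
    rw [List.length_drop] at hlen
    have hp : p < u.length := by omega
    have hp1 : p + 1 < u.length := by omega
    rw [List.drop_eq_getElem_cons hp, List.drop_eq_getElem_cons hp1] at h
    simp only [List.cons_prefix_cons] at h
    refine ⟨hp1, ?_, ?_⟩
    · simp [List.getD, List.getElem?_eq_getElem hp, h.1]
    · simp [List.getD, List.getElem?_eq_getElem hp1, h.2.1]
  · rintro ⟨hp1, hx, hy⟩
    have hp : p < u.length := by omega
    rw [List.drop_eq_getElem_cons hp, List.drop_eq_getElem_cons hp1]
    simp only [List.cons_prefix_cons]
    refine ⟨?_, ?_, List.nil_prefix⟩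
    · simp only [List.getD, List.getElem?_eq_getElem hp] at hx; simpa using hx.symm
    · simp only [List.getD, List.getElem?_eq_getElem hp1] at hy; simpa using hy.symm

theorem pvPref3_iff (u : List Char) (x y z : Char) (p : Nat) :
    [x, y, z] <+: u.drop p ↔ (p + 2 < u.length ∧ u.getD p ' ' = x ∧ u.getD (p+1) ' ' = y ∧ u.getD (p+2) ' ' = z) := by
  constructor
  · intro h
    have hlen : 3 ≤ (u.drop p).length := h.length_le
    rw [List.length_drop] at hlen
    have hp : p < u.length := by omega
    have hp1 : p + 1 < u.length := by omega
    have hp2 : p + 2 < u.length := by omega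
    rw [List.drop_eq_getElem_cons hp, List.drop_eq_getElem_cons hp1, List.drop_eq_getElem_cons hp2] at h
    simp only [List.cons_prefix_cons] at h
    refine ⟨hp2, ?_, ?_, ?_⟩
    · simp [List.getD, List.getElem?_eq_getElem hp, h.1]
    · simp [List.getD, List.getElem?_eq_getElem hp1, h.2.1]
    · simp [List.getD, List.getElem?_eq_getElem hp2, h.2.2.1]
  · rintro ⟨hp2, hx, hy, hz⟩
    have hp : p < u.length := by omega
    have hp1 : p + 1 < u.length := by omega
    rw [List.drop_eq_getElem_cons hp, List.drop_eq_getElem_cons hp1, List.drop_eq_getElem_cons hp2]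
    simp only [List.cons_prefix_cons]
    refine ⟨?_, ?_, ?_, List.nil_prefix⟩
    · simp only [List.getD, List.getElem?_eq_getElem hp] at hx; simpa using hx.symm
    · simp only [List.getD, List.getElem?_eq_getElem hp1] at hy; simpa using hy.symm
    · simp only [List.getD, List.getElem?_eq_getElem hp2] at hz; simpa using hz.symm

theorem pvGetD_map (t : List Char) (p : Nat) (h : p < t.length) :
    (t.map pvCat).getD p ' ' = pvCat (t.getD p ' ') := by
  simp [List.getD, h]

def pvC1 (t : List Char) (k : Nat) : Bool :=
  (PySem.Chars.islower (t.getD (k-1) ' ') || PySem.Chars.isdigit (t.getD (k-1) ' '))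
    && PySem.Chars.isupper (t.getD k ' ')

def pvC2 (t : List Char) (k : Nat) : Bool :=
  PySem.Chars.isupper (t.getD (k-1) ' ')
    && ((decide (2 ≤ k) && PySem.Chars.islower (t.getD k ' ')) && PySem.Chars.isupper (t.getD (k-2) ' '))

theorem pvPat1_iff (t : List Char) (k : Nat) (hk : 1 ≤ k) :
    (['l','u'] <+: (t.map pvCat).drop (k-1) ∨ ['d','u'] <+: (t.map pvCat).drop (k-1))
    ↔ (k < t.length ∧ pvC1 t k = true) := by
  have hk1 : k - 1 + 1 = k := by omega
  rw [pvPref2_iff, pvPref2_iff, List.length_map, hk1]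
  unfold pvC1
  constructor
  · rintro (⟨hlt, hx, hy⟩ | ⟨hlt, hx, hy⟩)
    · rw [pvGetD_map _ _ (by omega), pvCat_eq_l] at hx
      rw [pvGetD_map _ _ hlt, pvCat_eq_u] at hy
      exact ⟨hlt, by rw [Bool.and_eq_true, Bool.or_eq_true]; exact ⟨Or.inl hx, hy⟩⟩
    · rw [pvGetD_map _ _ (by omega), pvCat_eq_d] at hx
      rw [pvGetD_map _ _ hlt, pvCat_eq_u] at hy
      exact ⟨hlt, by rw [Bool.and_eq_true, Bool.or_eq_true]; exact ⟨Or.inr hx, hy⟩⟩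
  · rintro ⟨hlt, hc⟩
    simp only [Bool.and_eq_true, Bool.or_eq_true] at hc
    obtain ⟨hx | hx, hy⟩ := hc
    · exact Or.inl ⟨hlt, by rw [pvGetD_map _ _ (by omega), pvCat_eq_l]; exact hx,
        by rw [pvGetD_map _ _ hlt, pvCat_eq_u]; exact hy⟩
    · exact Or.inr ⟨hlt, by rw [pvGetD_map _ _ (by omega), pvCat_eq_d]; exact hx,
        by rw [pvGetD_map _ _ hlt, pvCat_eq_u]; exact hy⟩

theorem pvPat2_iff (t : List Char) (k : Nat) (hk : 2 ≤ k) :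
    (['u','u','l'] <+: (t.map pvCat).drop (k-2)) ↔ (k < t.length ∧ pvC2 t k = true) := by
  have h1 : k - 2 + 1 = k - 1 := by omega
  have h2 : k - 2 + 2 = k := by omega
  rw [pvPref3_iff, List.length_map, h1, h2]
  unfold pvC2
  constructor
  · rintro ⟨hlt, hx, hy, hz⟩
    refine ⟨hlt, ?_⟩
    rw [pvGetD_map _ _ (by omega), pvCat_eq_u] at hx
    rw [pvGetD_map _ _ (by omega), pvCat_eq_u] at hy
    rw [pvGetD_map _ _ hlt, pvCat_eq_l] at hz
    rw [Bool.and_eq_true, Bool.and_eq_true, Bool.and_eq_true, decide_eq_true_eq]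
    exact ⟨hy, ⟨hk, hz⟩, hx⟩
  · rintro ⟨hlt, hc⟩
    simp only [Bool.and_eq_true, decide_eq_true_eq] at hc
    exact ⟨hlt, by rw [pvGetD_map _ _ (by omega), pvCat_eq_u]; exact hc.2.2,
      by rw [pvGetD_map _ _ (by omega), pvCat_eq_u]; exact hc.1,
      by rw [pvGetD_map _ _ hlt, pvCat_eq_l]; exact hc.2.1.2⟩

def pvFF (t : List Char) (i : Nat) : Option Nat :=
  if i < t.length then (if pvC1 t i || pvC2 t i then some i else pvFF t (i+1)) else none
termination_by t.length - i

theorem pvLoopA_eq_ff (t : List Char) (i : Nat) :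
    pvLoopA t i = (match pvFF t i with
      | none => (String.ofList t, "")
      | some k => if pvC1 t k then (String.ofList (t.take k), String.ofList (t.drop k))
          else (String.ofList (t.take (k-1)), String.ofList (t.drop (k-1)))) := by
  fun_induction pvLoopA t i with
  | case1 i hlt hc1 =>
      rw [pvFF, if_pos hlt, if_pos (by rw [Bool.or_eq_true]; exact Or.inl hc1)]
      dsimp only
      rw [PySem.List.slice_to_natCast, PySem.List.slice_from_natCast,
        if_pos (show pvC1 t i = true from hc1)]
  | case2 i hlt hc1 hc2 =>
      rw [pvFF, if_pos hlt, if_pos (by rw [Bool.or_eq_true]; exact Or.inr hc2)]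
      dsimp only
      have : pvC1 t i = false := by rw [← Bool.not_eq_true]; exact hc1
      simp only [this, Bool.false_eq_true, if_false]
      rw [PySem.List.slice_to_natCast, PySem.List.slice_from_natCast]
  | case3 i hlt hc1 hc2 ih =>
      rw [pvFF, if_pos hlt, if_neg ?_]
      · exact ih
      · rw [Bool.or_eq_true]; rintro (h | h)
        · exact hc1 h
        · exact hc2 h
  | case4 i hlt =>
      rw [pvFF, if_neg hlt]

theorem pvFF_some (t : List Char) (i k : Nat) (h : pvFF t i = some k) :
    i ≤ k ∧ k < t.length ∧ (pvC1 t k || pvC2 t k) = true ∧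
      ∀ m, i ≤ m → m < k → (pvC1 t m || pvC2 t m) = false := by
  fun_induction pvFF t i with
  | case1 i hlt hc =>
      cases h
      exact ⟨le_refl _, hlt, hc, fun m h1 h2 => absurd (lt_of_le_of_lt h1 h2) (lt_irrefl _)⟩
  | case2 i hlt hc ih =>
      obtain ⟨h1, h2, h3, h4⟩ := ih h
      refine ⟨by omega, h2, h3, fun m hm1 hm2 => ?_⟩
      rcases Nat.eq_or_lt_of_le hm1 with rfl | hlt'
      · rw [← Bool.not_eq_true]; exact hc
      · exact h4 m hlt' hm2
  | case3 i hlt => cases h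

theorem pvFF_none (t : List Char) (i : Nat) (h : pvFF t i = none) :
    ∀ k, i ≤ k → k < t.length → (pvC1 t k || pvC2 t k) = false := by
  fun_induction pvFF t i with
  | case1 i hlt hc => cases h
  | case2 i hlt hc ih =>
      intro k hk1 hk2
      rcases Nat.eq_or_lt_of_le hk1 with rfl | hlt'
      · rw [← Bool.not_eq_true]; exact hc
      · exact ih h k hlt' hk2
  | case3 i hlt =>
      intro k hk1 hk2
      exact absurd (lt_of_le_of_lt hk1 hk2) (by omega)

theorem pvFind_neg (u pat : List Char) (h : ∀ q, ¬ pat <+: u.drop q) :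
    PySem.Chars.find u pat = -1 := by
  rw [PySem.Chars.find_eq_neg_one_iff]
  intro hinf
  obtain ⟨j, hj⟩ := (PySem.Chars.exists_prefix_drop_iff_isIn pat u).2
    ((PySem.Chars.isIn_iff_infix pat u).2 hinf)
  exact h j hj

theorem pvFind_le (u pat : List Char) (q : Nat) (h : pat <+: u.drop q) :
    0 ≤ PySem.Chars.find u pat ∧ (PySem.Chars.find u pat).toNat ≤ q := by
  have hne : PySem.Chars.find u pat ≠ -1 := by
    rw [PySem.Chars.find_ne_neg_one_iff]
    exact ((PySem.Chars.isIn_iff_infix pat u).1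
      ((PySem.Chars.exists_prefix_drop_iff_isIn pat u).1 ⟨q, h⟩))
  have h0 : 0 ≤ PySem.Chars.find u pat := by
    have := PySem.Chars.neg_one_le_find u pat
    omega
  refine ⟨h0, ?_⟩
  by_contra hq
  exact (PySem.Chars.find_spec h0).2 q (by omega) h

theorem pvScan_eq (t : List Char) :
    pvLoopA t 1 =
      (match
        (if PySem.Chars.find (t.map pvCat) ['l', 'u'] = -1 then
          (if PySem.Chars.find (t.map pvCat) ['d', 'u'] = -1 then none
           else some (PySem.Chars.find (t.map pvCat) ['d', 'u'] + 1))
         else if PySem.Chars.find (t.map pvCat) ['d', 'u'] = -1 then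
           some (PySem.Chars.find (t.map pvCat) ['l', 'u'] + 1)
         else some (min (PySem.Chars.find (t.map pvCat) ['l', 'u'])
             (PySem.Chars.find (t.map pvCat) ['d', 'u']) + 1) : Option Int),
        (if PySem.Chars.find (t.map pvCat) ['u', 'u', 'l'] = -1 then none
         else some (PySem.Chars.find (t.map pvCat) ['u', 'u', 'l'] + 2) : Option Int) with
       | some i1, none =>
           (String.ofList (PySem.List.slice t none (some i1)),
            String.ofList (PySem.List.slice t (some i1) none))
       | some i1, some i2 =>
           if i1 < i2 then
             (String.ofList (PySem.List.slice t none (some i1)),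
              String.ofList (PySem.List.slice t (some i1) none))
           else
             (String.ofList (PySem.List.slice t none (some (i2 - 1))),
              String.ofList (PySem.List.slice t (some (i2 - 1)) none))
       | none, some i2 =>
           (String.ofList (PySem.List.slice t none (some (i2 - 1))),
            String.ofList (PySem.List.slice t (some (i2 - 1)) none))
       | none, none => (String.ofList t, "")) := by
  rw [pvLoopA_eq_ff]
  cases hff : pvFF t 1 with
  | none =>
    have hn := pvFF_none t 1 hff
    have hf1 : PySem.Chars.find (t.map pvCat) ['l', 'u'] = -1 := by
      apply pvFind_neg; intro q hq
      have h := (pvPat1_iff t (q+1) (by omega)).1 (Or.inl (by simpa using hq))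
      have h2 := hn (q+1) (by omega) h.1
      simp [h.2] at h2
    have hf2 : PySem.Chars.find (t.map pvCat) ['d', 'u'] = -1 := by
      apply pvFind_neg; intro q hq
      have h := (pvPat1_iff t (q+1) (by omega)).1 (Or.inr (by simpa using hq))
      have h2 := hn (q+1) (by omega) h.1
      simp [h.2] at h2
    have he2 : PySem.Chars.find (t.map pvCat) ['u', 'u', 'l'] = -1 := by
      apply pvFind_neg; intro q hq
      have h := (pvPat2_iff t (q+2) (by omega)).1 (by simpa using hq)
      have h2 := hn (q+2) (by omega) h.1
      simp [h.2] at h2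
    rw [hf1, hf2, he2]
    norm_num
  | some k =>
    dsimp only
    obtain ⟨hk1, hklen, hfire, hmin⟩ := pvFF_some t 1 k hff
    have hlu_min : ∀ q, ['l','u'] <+: (t.map pvCat).drop q → k - 1 ≤ q := by
      intro q hq
      have h := (pvPat1_iff t (q+1) (by omega)).1 (Or.inl (by simpa using hq))
      by_contra hlt
      have h2 := hmin (q+1) (by omega) (by omega)
      simp [h.2] at h2
    have hdu_min : ∀ q, ['d','u'] <+: (t.map pvCat).drop q → k - 1 ≤ q := by
      intro q hq
      have h := (pvPat1_iff t (q+1) (by omega)).1 (Or.inr (by simpa using hq))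
      by_contra hlt
      have h2 := hmin (q+1) (by omega) (by omega)
      simp [h.2] at h2
    have huul_min : ∀ q, ['u','u','l'] <+: (t.map pvCat).drop q → k ≤ q + 2 := by
      intro q hq
      have h := (pvPat2_iff t (q+2) (by omega)).1 (by simpa using hq)
      by_contra hlt
      have h2 := hmin (q+2) (by omega) (by omega)
      simp [h.2] at h2
    by_cases hc1 : pvC1 t k = true
    · -- condition 1 fires at k: A splits at k; B's first boundary is i1 = k, with i2 > k if present
      have hnotc2k : pvC2 t k = false := by
        unfold pvC1 at hc1
        unfold pvC2
        rw [Bool.and_eq_true, Bool.or_eq_true] at hc1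
        rcases hc1.1 with hx | hx
        · rw [(pvExclChar _).1 hx]; rfl
        · rw [(pvExclChar _).2.2.2.2.2 hx]; rfl
      have he2cases : PySem.Chars.find (t.map pvCat) ['u','u','l'] = -1 ∨
          (0 ≤ PySem.Chars.find (t.map pvCat) ['u','u','l'] ∧
            (k : Int) < PySem.Chars.find (t.map pvCat) ['u','u','l'] + 2) := by
        by_cases h : PySem.Chars.find (t.map pvCat) ['u','u','l'] = -1
        · exact Or.inl h
        · right
          have h0 : 0 ≤ PySem.Chars.find (t.map pvCat) ['u','u','l'] := by
            have := PySem.Chars.neg_one_le_find (t.map pvCat) ['u','u','l']; omega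
          have hocc := (PySem.Chars.find_spec h0).1
          have hge := huul_min _ hocc
          have hne : (PySem.Chars.find (t.map pvCat) ['u','u','l']).toNat + 2 ≠ k := by
            intro heq
            have h2 := (pvPat2_iff t ((PySem.Chars.find (t.map pvCat) ['u','u','l']).toNat + 2)
              (by omega)).1 (by simpa using hocc)
            rw [heq] at h2
            rw [h2.2] at hnotc2k
            cases hnotc2k
          omega
      -- occurrence of the matching 2-pattern at k-1
      have hocc2 := (pvPat1_iff t k hk1).2 ⟨hklen, hc1⟩
      have hf1f2 : (PySem.Chars.find (t.map pvCat) ['l','u'] = ((k-1 : Nat) : Int) ∧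
            (PySem.Chars.find (t.map pvCat) ['d','u'] = -1 ∨ ((k-1:Nat) : Int) ≤ PySem.Chars.find (t.map pvCat) ['d','u'])) ∨
          (PySem.Chars.find (t.map pvCat) ['d','u'] = ((k-1 : Nat) : Int) ∧
            (PySem.Chars.find (t.map pvCat) ['l','u'] = -1 ∨ ((k-1:Nat) : Int) ≤ PySem.Chars.find (t.map pvCat) ['l','u'])) := by
        have hother : ∀ pat : List Char, (∀ q, pat <+: (t.map pvCat).drop q → k - 1 ≤ q) →
            PySem.Chars.find (t.map pvCat) pat = -1 ∨ ((k-1:Nat) : Int) ≤ PySem.Chars.find (t.map pvCat) pat := by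
          intro pat hmin'
          by_cases h : PySem.Chars.find (t.map pvCat) pat = -1
          · exact Or.inl h
          · right
            have h0 : 0 ≤ PySem.Chars.find (t.map pvCat) pat := by
              have := PySem.Chars.neg_one_le_find (t.map pvCat) pat; omega
            have := hmin' _ (PySem.Chars.find_spec h0).1
            omega
        rcases hocc2 with hq | hq
        · left
          have hle := pvFind_le _ _ (k-1) hq
          have hge := hlu_min _ (PySem.Chars.find_spec hle.1).1
          exact ⟨by omega, hother _ hdu_min⟩
        · right
          have hle := pvFind_le _ _ (k-1) hq
          have hge := hdu_min _ (PySem.Chars.find_spec hle.1).1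
          exact ⟨by omega, hother _ hlu_min⟩
      -- B's i1 equals k
      have hi1 : (if PySem.Chars.find (t.map pvCat) ['l', 'u'] = -1 then
          (if PySem.Chars.find (t.map pvCat) ['d', 'u'] = -1 then none
           else some (PySem.Chars.find (t.map pvCat) ['d', 'u'] + 1))
         else if PySem.Chars.find (t.map pvCat) ['d', 'u'] = -1 then
           some (PySem.Chars.find (t.map pvCat) ['l', 'u'] + 1)
         else some (min (PySem.Chars.find (t.map pvCat) ['l', 'u'])
             (PySem.Chars.find (t.map pvCat) ['d', 'u']) + 1) : Option Int) = some ((k : Nat) : Int) := by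
        rcases hf1f2 with ⟨hv, hrest⟩ | ⟨hv, hrest⟩
        · rw [hv, if_neg (by omega)]
          rcases hrest with h2 | h2
          · rw [if_pos h2]
            congr 1; omega
          · rw [if_neg (by omega)]
            congr 1
            rw [min_eq_left (by omega)]
            omega
        · rcases hrest with h2 | h2
          · rw [if_pos h2, if_neg (by omega), hv]
            congr 1; omega
          · rw [if_neg (by omega), if_neg (by omega), hv]
            congr 1
            rw [min_eq_right (by omega)]
            omega
      rw [if_pos hc1, hi1]
      rcases he2cases with he | ⟨he0, hegt⟩
      · rw [he, if_pos (rfl : (-1 : Int) = -1)]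
        dsimp only
        rw [PySem.List.slice_to_natCast, PySem.List.slice_from_natCast]
      · rw [if_neg (by omega : ¬ PySem.Chars.find (t.map pvCat) ['u','u','l'] = -1)]
        dsimp only
        rw [if_pos hegt, PySem.List.slice_to_natCast, PySem.List.slice_from_natCast]
    · -- condition 2 fires at k: A splits at k-1; B's e2 = k-2, i1 (if any) > k
      have hc2 : pvC2 t k = true := by
        have h := hfire
        rw [Bool.or_eq_true] at h
        rcases h with h | h
        · exact absurd h hc1
        · exact h
      have hk2 : 2 ≤ k := by
        unfold pvC2 at hc2
        simp only [Bool.and_eq_true, decide_eq_true_eq] at hc2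
        exact hc2.2.1.1
      have hocc := (pvPat2_iff t k hk2).2 ⟨hklen, hc2⟩
      have he2v : PySem.Chars.find (t.map pvCat) ['u','u','l'] = ((k-2 : Nat) : Int) := by
        have hle := pvFind_le _ _ (k-2) hocc
        have hge := huul_min _ (PySem.Chars.find_spec hle.1).1
        omega
      have hf_big : ∀ pat : List Char, (∀ q, pat <+: (t.map pvCat).drop q → k - 1 ≤ q) →
          (∀ q, pat <+: (t.map pvCat).drop q → q + 1 ≠ k) →
          PySem.Chars.find (t.map pvCat) pat = -1 ∨ ((k:Nat) : Int) ≤ PySem.Chars.find (t.map pvCat) pat := by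
        intro pat hmin' hne
        by_cases h : PySem.Chars.find (t.map pvCat) pat = -1
        · exact Or.inl h
        · right
          have h0 : 0 ≤ PySem.Chars.find (t.map pvCat) pat := by
            have := PySem.Chars.neg_one_le_find (t.map pvCat) pat; omega
          have hge := hmin' _ (PySem.Chars.find_spec h0).1
          have hne' := hne _ (PySem.Chars.find_spec h0).1
          omega
      have hf1big := hf_big ['l','u'] hlu_min (by
        intro q hq heq
        have h := (pvPat1_iff t (q+1) (by omega)).1 (Or.inl (by simpa using hq))
        rw [heq] at h
        exact hc1 h.2)
      have hf2big := hf_big ['d','u'] hdu_min (by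
        intro q hq heq
        have h := (pvPat1_iff t (q+1) (by omega)).1 (Or.inr (by simpa using hq))
        rw [heq] at h
        exact hc1 h.2)
      rw [if_neg hc1, he2v, if_neg (by omega : ¬ ((k-2:Nat) : Int) = -1)]
      have hi2v : ((k-2:Nat) : Int) + 2 - 1 = ((k-1 : Nat) : Int) := by omega
      rcases hf1big with h1 | h1
      · rcases hf2big with h2 | h2
        · rw [h1, if_pos rfl, if_pos h2]
          dsimp only
          rw [hi2v, PySem.List.slice_to_natCast, PySem.List.slice_from_natCast]
        · rw [h1, if_pos rfl, if_neg (by omega)]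
          dsimp only
          rw [if_neg (by omega), hi2v, PySem.List.slice_to_natCast, PySem.List.slice_from_natCast]
      · rcases hf2big with h2 | h2
        · rw [if_neg (by omega), if_pos h2]
          dsimp only
          rw [if_neg (by omega), hi2v, PySem.List.slice_to_natCast, PySem.List.slice_from_natCast]
        · rw [if_neg (by omega), if_neg (by omega)]
          dsimp only
          rw [if_neg (by omega), hi2v, PySem.List.slice_to_natCast, PySem.List.slice_from_natCast]


theorem split_sentence_main (s : String) : split_sentence s = split_sentence_alt s := by
  unfold split_sentence split_sentence_alt
  dsimp only
  by_cases hj : PySem.Chars.find (match s.toList with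
    | [] => ([] : List Char)
    | c :: rest => if PySem.Chars.islower c then rest else c :: rest) [' ', ' '] = -1
  · rw [if_neg (not_not_intro hj), if_neg (not_not_intro hj)]
    exact pvScan_eq _
  · rw [if_pos hj, if_pos hj]

-- ===== VERDICT =====
theorem split_sentence_spec : Claim_equal_split_sentence := by
  intro s _
  exact split_sentence_main s
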